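-- pv_equiv track=rewrite | github.com/gottie29/AllSkyKamera | setupui/cron_service.py | remove_legacy_sensor_autocron_lines
-- ===== SOURCE A (Python) =====
-- LEGACY_SENSOR_COMMENTS = {
--     "BME280 Sensor",
--     "DS18B20 Sensor",
--     "TSL2591 Sensor",
--     "MLX90614 Sensor",
--     "DHT11 Sensor",
--     "DHT22 Sensor",
--     "HTU21 / GY-21 Sensor",
--     "SHT3x Sensor",
-- }
--
-- def remove_legacy_sensor_autocron_lines(raw_crontab: str) -> str:
--     if not raw_crontab.strip():
--         return ""
--
--     lines = raw_crontab.splitlines()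
--     out = []
--     skip_next = False
--
--     for i, line in enumerate(lines):
--         if skip_next:
--             skip_next = False
--             continue
--
--         stripped = line.strip()
--
--         if stripped.startswith("# AUTOCRON:"):
--             comment = stripped.replace("# AUTOCRON:", "", 1).strip()
--
--             if comment in LEGACY_SENSOR_COMMENTS:
--                 if i + 1 < len(lines):
--                     next_line = lines[i + 1].strip()
--                     if next_line and not next_line.startswith("#"):
--                         skip_next = True
--                 continue
--
--         out.append(line)
--
--     cleaned = "\n".join(out).strip()
--     return cleaned + ("\n" if cleaned else "")
-- ===== SOURCE B (Python) =====
-- LEGACY_SENSOR_COMMENTS = {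
--     "BME280 Sensor",
--     "DS18B20 Sensor",
--     "TSL2591 Sensor",
--     "MLX90614 Sensor",
--     "DHT11 Sensor",
--     "DHT22 Sensor",
--     "HTU21 / GY-21 Sensor",
--     "SHT3x Sensor",
-- }
--
-- _PREFIX = "# AUTOCRON:"
--
--
-- def _is_legacy_marker(line):
--     s = line.strip()
--     return s.startswith(_PREFIX) and s[len(_PREFIX):].strip() in LEGACY_SENSOR_COMMENTS
--
--
-- def _swallows(line):
--     s = line.strip()
--     return bool(s) and not s.startswith("#")
--
--
-- def remove_legacy_sensor_autocron_lines(raw_crontab: str) -> str: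
--     if not raw_crontab.strip():
--         return ""
--     lines = raw_crontab.splitlines()
--     prevs = [None] + lines
--     kept = [line for prev, line in zip(prevs, lines)
--             if not _is_legacy_marker(line)
--             and not (prev is not None and _is_legacy_marker(prev) and _swallows(line))]
--     cleaned = "\n".join(kept).strip()
--     return cleaned + ("\n" if cleaned else "")
-- ===== Notes on version B (the rewrite author's own statement) =====
-- stated objective: simpler
-- what changed: Replaces A's stateful skip_next loop with a stateless filter: each line is paired with its predecessor (zip with [None]+lines) and kept unless it is itself a legacy AUTOCRON marker or the predecessor is one and the line is a non-empty non-comment.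
import Mathlib
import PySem

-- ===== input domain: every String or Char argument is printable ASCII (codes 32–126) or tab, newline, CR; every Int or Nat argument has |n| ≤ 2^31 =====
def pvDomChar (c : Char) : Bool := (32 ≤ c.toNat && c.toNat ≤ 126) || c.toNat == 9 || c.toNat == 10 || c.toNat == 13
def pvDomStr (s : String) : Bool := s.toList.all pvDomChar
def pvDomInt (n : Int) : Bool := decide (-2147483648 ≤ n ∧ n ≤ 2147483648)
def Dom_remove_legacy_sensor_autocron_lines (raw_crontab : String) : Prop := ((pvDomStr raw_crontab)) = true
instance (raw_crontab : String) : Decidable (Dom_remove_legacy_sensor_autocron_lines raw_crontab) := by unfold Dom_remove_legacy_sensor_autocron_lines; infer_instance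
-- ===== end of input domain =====

-- B replaces A's stateful skip_next loop by a stateless predecessor-paired filter; same O(n) cost, simpler decomposition.

-- ===== PORT A =====

-- the module constant LEGACY_SENSOR_COMMENTS (a Python set of strings)
def pvLegacySet : PySem.Set (List Char) :=
  PySem.Set.ofList
    [ "BME280 Sensor".toList, "DS18B20 Sensor".toList, "TSL2591 Sensor".toList,
      "MLX90614 Sensor".toList, "DHT11 Sensor".toList, "DHT22 Sensor".toList,
      "HTU21 / GY-21 Sensor".toList, "SHT3x Sensor".toList ]

def pvAutocron : List Char := "# AUTOCRON:".toList

-- hand port of Python's s.replace(old, "", 1): remove the FIRST occurrence of old only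
-- (exact: PySem.Chars.replace has no count argument; first occurrence located with Chars.find as CPython does)
def pvReplaceFirst (s old : List Char) : List Char :=
  let i := PySem.Chars.find s old
  if i = -1 then s else s.take i.toNat ++ s.drop (i.toNat + old.length)

-- A's for-loop over enumerate(lines) with the skip_next flag; lines[i+1] is the head of the rest
def pvALoop : List (List Char) → Bool → List (List Char)
  | [], _ => []
  | l :: rest, skip =>
    if skip then pvALoop rest false
    else
      let stripped := PySem.Chars.strip l
      if PySem.Chars.startswith stripped pvAutocron then
        let comment := PySem.Chars.strip (pvReplaceFirst stripped pvAutocron)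
        if PySem.Set.contains pvLegacySet comment then
          match rest with
          | [] => pvALoop rest false
          | next :: _ =>
            let nl := PySem.Chars.strip next
            pvALoop rest (!nl.isEmpty && !PySem.Chars.startswith nl "#".toList)
        else l :: pvALoop rest false
      else l :: pvALoop rest false

def remove_legacy_sensor_autocron_lines (raw_crontab : String) : String :=
  if PySem.Chars.strip raw_crontab.toList = [] then ""
  else
    let lines := PySem.Chars.splitlines raw_crontab.toList
    let out := pvALoop lines false
    let cleaned := PySem.Chars.strip (PySem.Chars.join "\n".toList out)
    String.ofList (cleaned ++ (if cleaned = [] then [] else "\n".toList))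

-- ===== PORT B =====

-- _is_legacy_marker(line): s[len(_PREFIX):] is the slice
def pvIsLegacyMarker (line : List Char) : Bool :=
  let s := PySem.Chars.strip line
  PySem.Chars.startswith s pvAutocron &&
    PySem.Set.contains pvLegacySet
      (PySem.Chars.strip (PySem.List.slice s (some (pvAutocron.length : Int)) none))

-- _swallows(line)
def pvSwallows (line : List Char) : Bool :=
  let s := PySem.Chars.strip line
  !s.isEmpty && !PySem.Chars.startswith s "#".toList

-- the list-comprehension filter over zip([None] + lines, lines)
def pvKeep (pl : Option (List Char) × List Char) : Bool :=
  !pvIsLegacyMarker pl.2 &&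
    !((match pl.1 with | some p => pvIsLegacyMarker p | none => false) && pvSwallows pl.2)

def remove_legacy_sensor_autocron_lines_alt (raw_crontab : String) : String :=
  if PySem.Chars.strip raw_crontab.toList = [] then ""
  else
    let lines := PySem.Chars.splitlines raw_crontab.toList
    let prevs : List (Option (List Char)) := none :: lines.map some
    let kept := ((prevs.zip lines).filter pvKeep).map Prod.snd
    let cleaned := PySem.Chars.strip (PySem.Chars.join "\n".toList kept)
    String.ofList (cleaned ++ (if cleaned = [] then [] else "\n".toList))

-- ===== PRECONDITION & SPEC =====
def Spec_remove_legacy_sensor_autocron_lines (raw_crontab : String) (out : String) : Prop := out = remove_legacy_sensor_autocron_lines_alt raw_crontab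
instance (raw_crontab : String) (out : String) : Decidable (Spec_remove_legacy_sensor_autocron_lines raw_crontab out) := by unfold Spec_remove_legacy_sensor_autocron_lines; infer_instance

-- ===== CLAIM (what is proved, stated in full; the proofs are below) =====
def Claim_equal_remove_legacy_sensor_autocron_lines : Prop := ∀ (raw_crontab : String), Dom_remove_legacy_sensor_autocron_lines raw_crontab → Spec_remove_legacy_sensor_autocron_lines raw_crontab (remove_legacy_sensor_autocron_lines raw_crontab)

-- ===== LEMMAS AND PROOFS =====

-- removing the first occurrence of a prefix is dropping it
lemma pvReplaceFirst_of_prefix (s old : List Char)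
    (h : PySem.Chars.startswith s old = true) :
    pvReplaceFirst s old = s.drop old.length := by
  have hpre : old <+: s := (PySem.Chars.startswith_iff s old).mp h
  have hnn : 0 ≤ PySem.Chars.find s old :=
    (PySem.Chars.find_nonneg_iff s old).mpr hpre.isInfix
  have hfind : PySem.Chars.find s old = 0 := by
    by_contra hne
    have hpos : 0 < (PySem.Chars.find s old).toNat := by omega
    have hspec := PySem.Chars.find_spec (s := s) (sub := old) hnn
    exact (hspec.2 0 hpos) (by simpa using hpre)
  simp [pvReplaceFirst, hfind]

-- A's inline legacy test equals B's _is_legacy_marker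
lemma pvLegacyA_eq (l : List Char) :
    pvIsLegacyMarker l =
      (PySem.Chars.startswith (PySem.Chars.strip l) pvAutocron &&
        PySem.Set.contains pvLegacySet
          (PySem.Chars.strip (pvReplaceFirst (PySem.Chars.strip l) pvAutocron))) := by
  simp only [pvIsLegacyMarker]
  by_cases h : PySem.Chars.startswith (PySem.Chars.strip l) pvAutocron = true
  · rw [pvReplaceFirst_of_prefix _ _ h,
        PySem.List.slice_from_natCast (PySem.Chars.strip l) pvAutocron.length]
  · simp only [Bool.not_eq_true] at h
    simp [h]

-- a line that swallows is never itself a legacy marker (it does not start with '#')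
lemma pvSwallows_not_legacy (l : List Char) (h : pvSwallows l = true) :
    pvIsLegacyMarker l = false := by
  simp only [pvSwallows, Bool.and_eq_true, Bool.not_eq_true'] at h
  by_contra hne
  simp only [Bool.not_eq_false, pvIsLegacyMarker, Bool.and_eq_true] at hne
  have hpre : pvAutocron <+: PySem.Chars.strip l :=
    (PySem.Chars.startswith_iff _ _).mp hne.1
  have hhash : PySem.Chars.startswith (PySem.Chars.strip l) "#".toList = true := by
    refine (PySem.Chars.startswith_iff _ _).mpr ?_
    exact List.IsPrefix.trans ⟨"# AUTOCRON:".toList.drop 1, rfl⟩ hpre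
  rw [h.2] at hhash
  exact absurd hhash (by decide)

-- the skip flag A carries into a list, expressed from the predecessor line
def pvPrevSkips (prev : Option (List Char)) (lines : List (List Char)) : Bool :=
  match prev, lines with
  | some q, l :: _ => pvIsLegacyMarker q && pvSwallows l
  | _, _ => false

lemma pvLoop_eq : ∀ (lines : List (List Char)) (prev : Option (List Char)),
    pvALoop lines (pvPrevSkips prev lines) =
      (((prev :: lines.map some).zip lines).filter pvKeep).map Prod.snd := by
  intro lines
  induction lines with
  | nil => intro prev; cases prev <;> rfl
  | cons l rest ih =>
    intro prev
    have hA := pvLegacyA_eq l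
    by_cases hs : pvPrevSkips prev (l :: rest) = true
    · -- A skips this line
      obtain ⟨q, hq⟩ : ∃ q, prev = some q := by
        cases prev with
        | none => simp [pvPrevSkips] at hs
        | some q => exact ⟨q, rfl⟩
      subst hq
      simp only [pvPrevSkips, Bool.and_eq_true] at hs
      have hnl : pvIsLegacyMarker l = false := pvSwallows_not_legacy l hs.2
      have hrest : pvPrevSkips (some l) rest = false := by
        cases rest <;> simp [pvPrevSkips, hnl]
      have hkeep : pvKeep (some q, l) = false := by
        simp [pvKeep, hs.1, hs.2]
      have hs' : pvPrevSkips (some q) (l :: rest) = true := by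
        simp [pvPrevSkips, hs.1, hs.2]
      rw [hs']
      have hLHS : pvALoop (l :: rest) true = pvALoop rest false := by
        simp [pvALoop]
      rw [hLHS, ← hrest, ih (some l)]
      simp [hkeep]
    · -- A processes this line
      rw [Bool.not_eq_true] at hs
      rw [hs]
      by_cases hleg : pvIsLegacyMarker l = true
      · -- legacy marker: dropped, skip for the rest read off the next line
        obtain ⟨h1, h2⟩ := Bool.and_eq_true _ _ |>.mp (hA ▸ hleg)
        have h2m : PySem.Chars.strip (pvReplaceFirst (PySem.Chars.strip l) pvAutocron) ∈ pvLegacySet :=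
          (PySem.Set.contains_iff _ _).mp h2
        have hkeep : pvKeep (prev, l) = false := by simp [pvKeep, hleg]
        have hLHS : pvALoop (l :: rest) false = pvALoop rest (pvPrevSkips (some l) rest) := by
          cases rest with
          | nil => simp [pvALoop, h1, h2m]
          | cons next r =>
            simp [pvALoop, h1, h2m, pvPrevSkips, hleg, pvSwallows]
        rw [hLHS, ih (some l)]
        simp [hkeep]
      · -- ordinary line: kept
        rw [Bool.not_eq_true] at hleg
        have hcond : (PySem.Chars.startswith (PySem.Chars.strip l) pvAutocron &&
            PySem.Set.contains pvLegacySet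
              (PySem.Chars.strip (pvReplaceFirst (PySem.Chars.strip l) pvAutocron))) = false := by
          rw [← hA]; exact hleg
        have hkeep : pvKeep (prev, l) = true := by
          cases prev with
          | none => simp [pvKeep, hleg]
          | some q =>
            simp only [pvKeep, hleg, Bool.not_false, Bool.true_and]
            simp only [pvPrevSkips] at hs
            simp [hs]
        have hrest : pvPrevSkips (some l) rest = false := by
          cases rest <;> simp [pvPrevSkips, hleg]
        have hLHS : pvALoop (l :: rest) false = l :: pvALoop rest false := by
          rcases Bool.and_eq_false_iff.mp hcond with h1 | h2
          · simp [pvALoop, h1]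
          · by_cases h1 : PySem.Chars.startswith (PySem.Chars.strip l) pvAutocron = true
            · have h2m : ¬ (PySem.Chars.strip (pvReplaceFirst (PySem.Chars.strip l) pvAutocron) ∈ pvLegacySet) := by
                intro hm
                rw [(PySem.Set.contains_iff _ _).mpr hm] at h2
                exact Bool.true_eq_false.mp h2
              simp [pvALoop, h1, h2m]
            · simp [pvALoop, h1]
        rw [hLHS, ← hrest, ih (some l)]
        simp [hkeep]

-- ===== VERDICT (by name: the statement is the Claim_ definition above) =====
theorem remove_legacy_sensor_autocron_lines_spec : Claim_equal_remove_legacy_sensor_autocron_lines := by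
  intro raw _
  show remove_legacy_sensor_autocron_lines raw = remove_legacy_sensor_autocron_lines_alt raw
  unfold remove_legacy_sensor_autocron_lines remove_legacy_sensor_autocron_lines_alt
  by_cases h : PySem.Chars.strip raw.toList = []
  · simp [h]
  · simp only [if_neg h]
    have := pvLoop_eq (PySem.Chars.splitlines raw.toList) none
    simp only [pvPrevSkips] at this
    rw [this]
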